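-- pv_equiv track=rewrite | github.com/day0market/support_resistance | pricelevels/counter.py | _aggregate_prices_to_levels
-- ===== SOURCE A (Python) =====
-- def _aggregate_prices_to_levels(pivot_prices, distance):
--     levels = sorted(pivot_prices)
--     scored_levels = []
--     for price_level in levels:
--         count = 0
--         for other_level in levels:
--             if other_level < price_level - distance:
--                 continue
--             if other_level > price_level + distance:
--                 break
--             count += 1
--
--         scored_levels.append(
--             {
--                 'price': price_level,
--                 'count': count
--             }
--         )
--
--     return scored_levels
-- ===== SOURCE B (Python) =====
-- def _aggregate_prices_to_levels(pivot_prices, distance):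
--     levels = sorted(pivot_prices)
--     n = len(levels)
--     lo = 0
--     hi = 0
--     scored_levels = []
--     for price_level in levels:
--         while lo < n and levels[lo] < price_level - distance:
--             lo += 1
--         while hi < n and levels[hi] <= price_level + distance:
--             hi += 1
--         scored_levels.append({
--             'price': price_level,
--             'count': max(0, hi - lo)
--         })
--     return scored_levels
-- ===== Notes on version B (the rewrite author's own statement) =====
-- stated objective: faster
-- what changed: Replaced the per-level inner scan over all levels with two monotone sliding-window pointers over the sorted list, computing each window count as a pointer difference.
import Mathlib
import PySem

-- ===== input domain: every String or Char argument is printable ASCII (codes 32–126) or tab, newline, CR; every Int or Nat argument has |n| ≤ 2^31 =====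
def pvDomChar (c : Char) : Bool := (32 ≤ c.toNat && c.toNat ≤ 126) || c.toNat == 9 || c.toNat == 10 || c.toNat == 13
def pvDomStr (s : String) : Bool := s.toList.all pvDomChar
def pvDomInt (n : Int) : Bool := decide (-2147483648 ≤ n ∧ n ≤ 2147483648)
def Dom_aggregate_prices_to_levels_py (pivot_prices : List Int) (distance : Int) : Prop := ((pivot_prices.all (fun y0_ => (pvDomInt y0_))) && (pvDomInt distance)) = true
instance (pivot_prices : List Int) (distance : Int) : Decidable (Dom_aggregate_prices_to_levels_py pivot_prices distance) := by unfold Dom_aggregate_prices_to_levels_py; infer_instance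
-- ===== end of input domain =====

-- B replaces A's per-level rescan of the whole sorted list by two monotone sliding-window pointers (objective: faster).

-- ===== PORT A =====
-- A's inner loop: for other_level in levels: continue if < price_level-distance, break if > price_level+distance, else count += 1
def pvInnerA (levels : List Int) (lo hi : Int) (count : Int) : Int :=
  match levels with
  | [] => count
  | x :: xs =>
    if x < lo then pvInnerA xs lo hi count
    else if x > hi then count
    else pvInnerA xs lo hi (count + 1)

def aggregate_prices_to_levels_py (pivot_prices : List Int) (distance : Int) : List (List (String × Int)) :=
  let levels := PySem.List.sorted pivot_prices (fun x => x) false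
  levels.foldl (fun scored_levels price_level =>
    scored_levels ++ [[("price", price_level), ("count", pvInnerA levels (price_level - distance) (price_level + distance) 0)]]) []

-- ===== PORT B =====
-- while lo < n and levels[lo] < bound: lo += 1
def pvAdvLo (levels : List Int) (bound : Int) (lo : Nat) : Nat :=
  if lo < levels.length ∧ levels.getD lo 0 < bound then pvAdvLo levels bound (lo + 1) else lo
termination_by levels.length - lo
decreasing_by omega

-- while hi < n and levels[hi] <= bound: hi += 1
def pvAdvHi (levels : List Int) (bound : Int) (hi : Nat) : Nat :=
  if hi < levels.length ∧ levels.getD hi 0 ≤ bound then pvAdvHi levels bound (hi + 1) else hi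
termination_by levels.length - hi
decreasing_by omega

def aggregate_prices_to_levels_py_alt (pivot_prices : List Int) (distance : Int) : List (List (String × Int)) :=
  let levels := PySem.List.sorted pivot_prices (fun x => x) false
  (levels.foldl (fun (st : Nat × Nat × List (List (String × Int))) price_level =>
    let lo := pvAdvLo levels (price_level - distance) st.1
    let hi := pvAdvHi levels (price_level + distance) st.2.1
    (lo, hi, st.2.2 ++ [[("price", price_level), ("count", max 0 ((hi : Int) - (lo : Int)))]]))
    (0, 0, [])).2.2

-- ===== PRECONDITION & SPEC =====
def Spec_aggregate_prices_to_levels_py (pivot_prices : List Int) (distance : Int) (out : List (List (String × Int))) : Prop := out = aggregate_prices_to_levels_py_alt pivot_prices distance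
instance (pivot_prices : List Int) (distance : Int) (out : List (List (String × Int))) : Decidable (Spec_aggregate_prices_to_levels_py pivot_prices distance out) := by unfold Spec_aggregate_prices_to_levels_py; infer_instance

-- ===== CLAIM (what is proved, stated in full; the proofs are below) =====
def Claim_equal_aggregate_prices_to_levels_py : Prop := ∀ (pivot_prices : List Int) (distance : Int), Dom_aggregate_prices_to_levels_py pivot_prices distance → Spec_aggregate_prices_to_levels_py pivot_prices distance (aggregate_prices_to_levels_py pivot_prices distance)

-- ===== LEMMAS AND PROOFS =====

-- the common specification of one window count
def pvCnt (L : List Int) (lo hi : Int) : Nat := L.countP (fun x => decide (lo ≤ x) && decide (x ≤ hi))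

theorem pvInnerA_acc (L : List Int) (lo hi c : Int) :
    pvInnerA L lo hi c = c + pvInnerA L lo hi 0 := by
  induction L generalizing c with
  | nil => simp [pvInnerA]
  | cons x xs ih =>
    simp only [pvInnerA]
    split_ifs with h1 h2
    · exact ih c
    · simp
    · rw [ih (c + 1), ih (0 + 1)]; ring

theorem pvInnerA_eq_cnt (L : List Int) (lo hi : Int)
    (hs : L.Pairwise (· ≤ ·)) : pvInnerA L lo hi 0 = (pvCnt L lo hi : Int) := by
  induction L with
  | nil => simp [pvInnerA, pvCnt]
  | cons x xs ih =>
    rcases List.pairwise_cons.mp hs with ⟨hx, hxs⟩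
    simp only [pvInnerA]
    split_ifs with h1 h2
    · have hn : ¬ lo ≤ x := by omega
      simp [pvCnt, hn, ih hxs]
    · -- break: everything from here on is > hi
      have hn : ¬ x ≤ hi := by omega
      have hz : xs.countP (fun y => decide (lo ≤ y) && decide (y ≤ hi)) = 0 := by
        rw [List.countP_eq_zero]
        intro y hy
        have := hx y hy
        simp
        intro h; omega
      simp [pvCnt, hn, hz]
    · have hle : lo ≤ x := by omega
      have hhi : x ≤ hi := by omega
      rw [pvInnerA_acc, ih hxs]
      simp [pvCnt, hle, hhi]
      ring

-- on a sorted list, the elements < b occupy exactly the first (countP (· < b)) positions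
theorem pvSorted_lt_iff (L : List Int) (b : Int) (hs : L.Pairwise (· ≤ ·))
    (j : Nat) (hj : j < L.length) :
    (L.getD j 0 < b ↔ j < L.countP (fun x => decide (x < b))) := by
  induction L generalizing j with
  | nil => simp at hj
  | cons x xs ih =>
    rcases List.pairwise_cons.mp hs with ⟨hx, hxs⟩
    rcases j with _ | j
    · simp only [List.getD_cons_zero, List.countP_cons]
      by_cases hxb : x < b
      · simp [hxb]
      · have hz : xs.countP (fun y => decide (y < b)) = 0 := by
          rw [List.countP_eq_zero]
          intro y hy; have := hx y hy; simp; omega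
        simp [hxb, hz]
    · simp only [List.getD_cons_succ, List.countP_cons]
      rw [ih hxs j (by simpa using hj)]
      by_cases hxb : x < b
      · simp [hxb]
      · have hz : xs.countP (fun y => decide (y < b)) = 0 := by
          rw [List.countP_eq_zero]
          intro y hy; have := hx y hy; simp; omega
        simp [hxb, hz]

theorem pvSorted_le_iff (L : List Int) (b : Int) (hs : L.Pairwise (· ≤ ·))
    (j : Nat) (hj : j < L.length) :
    (L.getD j 0 ≤ b ↔ j < L.countP (fun x => decide (x ≤ b))) := by
  have h := pvSorted_lt_iff L (b + 1) hs j hj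
  have he : L.countP (fun x => decide (x < b + 1)) = L.countP (fun x => decide (x ≤ b)) := by
    apply List.countP_congr; intro y _; simp
  rw [he] at h
  constructor
  · intro hy; exact h.mp (by omega)
  · intro hy; have := h.mpr hy; omega

theorem pvAdvLo_eq (L : List Int) (b : Int) (hs : L.Pairwise (· ≤ ·)) (i : Nat)
    (hik : i ≤ L.countP (fun x => decide (x < b))) :
    pvAdvLo L b i = L.countP (fun x => decide (x < b)) := by
  have hkl : L.countP (fun x => decide (x < b)) ≤ L.length := List.countP_le_length ..
  rw [pvAdvLo]
  by_cases hlt : i < L.countP (fun x => decide (x < b))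
  · have hil : i < L.length := by omega
    have : L.getD i 0 < b := (pvSorted_lt_iff L b hs i hil).mpr hlt
    rw [if_pos ⟨hil, this⟩]
    exact pvAdvLo_eq L b hs (i + 1) (by omega)
  · have hie : i = L.countP (fun x => decide (x < b)) := by omega
    rw [if_neg]
    · exact hie
    · rintro ⟨h1, h2⟩
      exact absurd ((pvSorted_lt_iff L b hs i h1).mp h2) (by omega)
termination_by L.countP (fun x => decide (x < b)) - i
decreasing_by omega

theorem pvAdvHi_eq (L : List Int) (b : Int) (hs : L.Pairwise (· ≤ ·)) (i : Nat)
    (hik : i ≤ L.countP (fun x => decide (x ≤ b))) :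
    pvAdvHi L b i = L.countP (fun x => decide (x ≤ b)) := by
  have hkl : L.countP (fun x => decide (x ≤ b)) ≤ L.length := List.countP_le_length ..
  rw [pvAdvHi]
  by_cases hlt : i < L.countP (fun x => decide (x ≤ b))
  · have hil : i < L.length := by omega
    have : L.getD i 0 ≤ b := (pvSorted_le_iff L b hs i hil).mpr hlt
    rw [if_pos ⟨hil, this⟩]
    exact pvAdvHi_eq L b hs (i + 1) (by omega)
  · have hie : i = L.countP (fun x => decide (x ≤ b)) := by omega
    rw [if_neg]
    · exact hie
    · rintro ⟨h1, h2⟩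
      exact absurd ((pvSorted_le_iff L b hs i h1).mp h2) (by omega)
termination_by L.countP (fun x => decide (x ≤ b)) - i
decreasing_by omega

-- window count as a difference of prefix counts (pure counting, no sortedness needed)
theorem pvCnt_split (L : List Int) (lo hi : Int) (h : lo ≤ hi + 1) :
    L.countP (fun x => decide (x ≤ hi))
      = L.countP (fun x => decide (x < lo)) + pvCnt L lo hi := by
  induction L with
  | nil => simp [pvCnt]
  | cons x xs ih =>
    simp only [pvCnt, List.countP_cons] at *
    rw [ih]
    by_cases h1 : x < lo
    · have h2 : x ≤ hi := by omega
      have h3 : ¬ lo ≤ x := by omega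
      simp [h1, h2, h3]; omega
    · by_cases h2 : x ≤ hi
      · have h3 : lo ≤ x := by omega
        simp [h1, h2, h3]; omega
      · simp [h1, h2]

theorem pvCnt_sub (L : List Int) (lo hi : Int) :
    max 0 ((L.countP (fun x => decide (x ≤ hi)) : Int) - (L.countP (fun x => decide (x < lo)) : Int))
      = (pvCnt L lo hi : Int) := by
  by_cases h : lo ≤ hi + 1
  · rw [pvCnt_split L lo hi h]
    push_cast
    omega
  · have hz : pvCnt L lo hi = 0 := by
      rw [pvCnt, List.countP_eq_zero]
      intro y _; simp; intro hy; omega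
    have hle : L.countP (fun x => decide (x ≤ hi)) ≤ L.countP (fun x => decide (x < lo)) := by
      apply List.countP_mono_left
      intro y _ hy
      simp at hy ⊢
      omega
    rw [hz]
    push_cast
    omega

-- the shape of one output record, shared by both sides
def pvEntry (L : List Int) (d p : Int) : List (String × Int) :=
  [("price", p), ("count", (pvCnt L (p - d) (p + d) : Int))]

-- A's accumulating foldl is a map
theorem pvFoldA (L : List Int) (d : Int) (hs : L.Pairwise (· ≤ ·)) :
    ∀ (M : List Int) (acc : List (List (String × Int))),
    M.foldl (fun scored p => scored ++ [[("price", p), ("count", pvInnerA L (p - d) (p + d) 0)]]) acc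
      = acc ++ M.map (pvEntry L d) := by
  intro M
  induction M with
  | nil => simp
  | cons p M ih =>
    intro acc
    simp only [List.foldl_cons, List.map_cons]
    rw [ih, pvInnerA_eq_cnt L _ _ hs]
    simp [pvEntry]

-- B's stateful foldl produces the same map, given the pointer invariant
theorem pvFoldB (L : List Int) (d : Int) (hs : L.Pairwise (· ≤ ·)) :
    ∀ (M : List Int) (lo₀ hi₀ : Nat) (acc : List (List (String × Int))),
    M.Pairwise (· ≤ ·) →
    (∀ p ∈ M, lo₀ ≤ L.countP (fun x => decide (x < p - d)) ∧
              hi₀ ≤ L.countP (fun x => decide (x ≤ p + d))) →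
    (M.foldl (fun (st : Nat × Nat × List (List (String × Int))) p =>
        let lo := pvAdvLo L (p - d) st.1
        let hi := pvAdvHi L (p + d) st.2.1
        (lo, hi, st.2.2 ++ [[("price", p), ("count", max 0 ((hi : Int) - (lo : Int)))]]))
      (lo₀, hi₀, acc)).2.2
      = acc ++ M.map (pvEntry L d) := by
  intro M
  induction M with
  | nil => simp
  | cons p M ih =>
    intro lo₀ hi₀ acc hM hinv
    rcases List.pairwise_cons.mp hM with ⟨hp, hM'⟩
    have hinvp := hinv p (List.mem_cons_self ..)
    have hlo : pvAdvLo L (p - d) lo₀ = L.countP (fun x => decide (x < p - d)) :=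
      pvAdvLo_eq L (p - d) hs lo₀ hinvp.1
    have hhi : pvAdvHi L (p + d) hi₀ = L.countP (fun x => decide (x ≤ p + d)) :=
      pvAdvHi_eq L (p + d) hs hi₀ hinvp.2
    simp only [List.foldl_cons, List.map_cons]
    rw [ih _ _ _ hM']
    · rw [hlo, hhi, pvCnt_sub L (p - d) (p + d)]
      simp [pvEntry]
    · intro q hq
      have hpq : p ≤ q := hp q hq
      constructor
      · rw [hlo]
        apply List.countP_mono_left
        intro y _ hy; simp at hy ⊢; omega
      · rw [hhi]
        apply List.countP_mono_left
        intro y _ hy; simp at hy ⊢; omega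

-- ===== VERDICT (by name: the statement is the Claim_ definition above) =====
theorem aggregate_prices_to_levels_py_spec : Claim_equal_aggregate_prices_to_levels_py := by
  intro pivot_prices distance _
  unfold Spec_aggregate_prices_to_levels_py aggregate_prices_to_levels_py aggregate_prices_to_levels_py_alt
  have hs : (PySem.List.sorted pivot_prices (fun x => x) false).Pairwise (· ≤ ·) :=
    PySem.List.sorted_pairwise ..
  rw [pvFoldA _ distance hs _ [], pvFoldB _ distance hs _ 0 0 [] hs]
  intro p _
  exact ⟨Nat.zero_le _, Nat.zero_le _⟩
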